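-- pv_equiv track=rewrite | github.com/suryiavishnusoranam/CSE_111 | esteem_team.py | evalutate
-- ===== SOURCE A (Python) =====
-- def evalutate(answers, positives):
--     values = []
--     iteration = 0
--     for x in answers:
--         positive = positives[iteration]
--         values.append(letter_to_value(x, positive))
--         iteration = iteration + 1
--     return values
--
-- def letter_to_value(letter, positive):
--     """
--     The letter value is either A, a, d, or D.
--     """
--     if positive == 0:
--         letterislower = letter.islower()
--         if letterislower == True:
--             if letter == "a":
--                 score = 2
--             elif letter == "d":
--                 score = 1
--             else:
--                 score = 0
--         else:
--             if letter == "A":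
--                 score = 3
--             elif letter == "D":
--                 score = 0
--             else:
--                 score = 0
--     if positive == 1:
--         letterislower = letter.islower()
--         if letterislower == True:
--             if letter == "a":
--                 score = 1
--             elif letter == "d":
--                 score = 2
--             else:
--                 score = 0
--         else:
--             if letter == "A":
--                 score = 0
--             elif letter == "D":
--                 score = 3
--             else:
--                 score = 0
--     return score
-- ===== SOURCE B (Python) =====
-- def evalutate(answers, positives):
--     # decode each polarity to its favorable family (False = a-side, True = d-side),
--     # then score arithmetically: a valid letter scores 2+upper when its family
--     # agrees with the favorable side, 1-upper when it disagrees; others 0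
--     scores = []
--     for i, x in enumerate(answers):
--         favside = {0: False, 1: True}[positives[i]]
--         if x not in ("a", "A", "d", "D"):
--             scores.append(0)
--         else:
--             fav = (x in ("d", "D")) == favside
--             up = x in ("A", "D")
--             scores.append(2 + up if fav else 1 - up)
--     return scores
-- ===== Notes on version B (the rewrite author's own statement) =====
-- stated objective: alternative
-- what changed: The two duplicated islower/if-elif score cascades are replaced by a polarity decode ({0,1} -> favorable family) plus one arithmetic rule: a valid letter scores 2+uppercase when its family (a/A vs d/D) agrees with the favorable side and 1-uppercase when it disagrees, anything else scores 0.
import Mathlib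
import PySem

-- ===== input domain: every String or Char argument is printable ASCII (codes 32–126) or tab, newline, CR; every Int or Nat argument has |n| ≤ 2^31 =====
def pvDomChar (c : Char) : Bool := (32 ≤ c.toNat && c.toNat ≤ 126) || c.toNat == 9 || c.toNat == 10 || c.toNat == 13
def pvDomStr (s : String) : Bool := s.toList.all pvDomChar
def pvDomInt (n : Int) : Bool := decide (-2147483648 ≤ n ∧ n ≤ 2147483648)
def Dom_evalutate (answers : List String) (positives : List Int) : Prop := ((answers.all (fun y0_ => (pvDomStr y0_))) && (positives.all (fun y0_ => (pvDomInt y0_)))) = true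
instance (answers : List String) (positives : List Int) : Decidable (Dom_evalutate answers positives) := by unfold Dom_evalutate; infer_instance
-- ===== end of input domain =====

-- B replaces A's duplicated islower/if-elif score cascades by one arithmetic rule
-- (2+upper when the letter family agrees with the polarity's favorable side,
-- 1-upper when it disagrees, else 0): objective = alternative.


-- ===== PORT A =====
-- str.islower(), ported by hand: at least one cased char and no uppercase char;
-- exact on the ASCII domain, where the cased characters are exactly the letters.
def strIslowerA (s : String) : Bool :=
  s.toList.any (fun c => PySem.Chars.isalpha c) && s.toList.all (fun c => !PySem.Chars.isupper c)

-- `none` models `score` being left unbound (UnboundLocalError when positive ∉ {0, 1})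
def letterToValue (letter : String) (positive : Int) : Option Int :=
  let score : Option Int := none
  let score : Option Int :=
    if positive = 0 then
      let letterislower := strIslowerA letter
      if letterislower = true then
        some (if letter = "a" then 2 else if letter = "d" then 1 else 0)
      else
        some (if letter = "A" then 3 else if letter = "D" then 0 else 0)
    else score
  let score : Option Int :=
    if positive = 1 then
      let letterislower := strIslowerA letter
      if letterislower = true then
        some (if letter = "a" then 1 else if letter = "d" then 2 else 0)
      else
        some (if letter = "A" then 0 else if letter = "D" then 3 else 0)
    else score
  score

-- the for-loop over answers; `none` = an exception escaped (IndexError / UnboundLocalError)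
def evalutateLoop (answers : List String) (positives : List Int)
    (st : Option (List Int × Int)) : Option (List Int × Int) :=
  answers.foldl
    (fun st x =>
      match st with
      | none => none
      | some (values, iteration) =>
        match PySem.List.pyGet? positives iteration with
        | none => none
        | some positive =>
          match letterToValue x positive with
          | none => none
          | some v => some (values ++ [v], iteration + 1))
    st

def evalutate (answers : List String) (positives : List Int) : List Int :=
  ((evalutateLoop answers positives (some ([], 0))).map Prod.fst).getD []

-- ===== PORT B =====
-- the literal {0: False, 1: True} polarity-decode dict of B
def polTable : PySem.Dict Int Bool := PySem.Dict.ofList [(0, false), (1, true)]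

-- one iteration of B's loop body; `none` = IndexError from positives[i]
-- or KeyError from the polarity decode
def stepB (positives : List Int) (st : Option (List Int)) (ix : Int × String) : Option (List Int) :=
  match st with
  | none => none
  | some scores =>
    match PySem.List.pyGet? positives ix.1 with
    | none => none
    | some p =>
      match PySem.Dict.get? polTable p with
      | none => none
      | some favside =>
        let x := ix.2
        if ¬(x = "a" ∨ x = "A" ∨ x = "d" ∨ x = "D") then some (scores ++ [(0 : Int)])
        else
          let fav : Bool := decide (x = "d" ∨ x = "D") == favside
          let up : Int := if x = "A" ∨ x = "D" then 1 else 0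
          some (scores ++ [if fav then 2 + up else 1 - up])

-- the for-loop over enumerate(answers)
def evalutateAltLoop (answers : List String) (positives : List Int)
    (st : Option (List Int)) : Option (List Int) :=
  (PySem.List.enumerate answers 0).foldl (stepB positives) st

def evalutate_alt (answers : List String) (positives : List Int) : List Int :=
  (evalutateAltLoop answers positives (some [])).getD []

-- ===== PRECONDITION & SPEC =====
-- A raises IndexError when positives is shorter than answers, and UnboundLocalError when a
-- consumed polarity is not 0 or 1 (score stays unbound); exactly those inputs are excluded.
def Pre_evalutate (answers : List String) (positives : List Int) : Prop :=
  answers.length ≤ positives.length ∧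
  ∀ p ∈ positives.take answers.length, p = 0 ∨ p = 1
instance (answers : List String) (positives : List Int) : Decidable (Pre_evalutate answers positives) := by unfold Pre_evalutate; infer_instance

def pvWitness_evalutate : List String × List Int := (["a", "D", "x"], [0, 1, 1])

def Spec_evalutate (answers : List String) (positives : List Int) (out : List Int) : Prop := out = evalutate_alt answers positives
instance (answers : List String) (positives : List Int) (out : List Int) : Decidable (Spec_evalutate answers positives out) := by unfold Spec_evalutate; infer_instance

-- ===== CLAIM (what is proved, stated in full; the proofs are below) =====
def Claim_equal_evalutate : Prop := ∀ (answers : List String) (positives : List Int), Dom_evalutate answers positives → Pre_evalutate answers positives → Spec_evalutate answers positives (evalutate answers positives)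

-- ===== LEMMAS AND PROOFS =====

-- the per-element value B computes
def bElem (x : String) (p : Int) : Int :=
  if ¬(x = "a" ∨ x = "A" ∨ x = "d" ∨ x = "D") then 0
  else
    let fav : Bool := decide (x = "d" ∨ x = "D") == decide (p = 1)
    let up : Int := if x = "A" ∨ x = "D" then 1 else 0
    if fav then 2 + up else 1 - up

lemma letterToValue_valid (x : String) (p : Int) (hp : p = 0 ∨ p = 1) :
    letterToValue x p = some (bElem x p) := by
  rcases hp with hp | hp <;> subst hp <;>
  · by_cases h1 : x = "a"
    · subst h1; decide
    by_cases h2 : x = "A"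
    · subst h2; decide
    by_cases h3 : x = "d"
    · subst h3; decide
    by_cases h4 : x = "D"
    · subst h4; decide
    simp [letterToValue, bElem, h1, h2, h3, h4]

lemma loopA_eq (ans : List String) : ∀ (pos pref acc : List Int),
    ans.length ≤ pos.length →
    (∀ p ∈ pos.take ans.length, p = 0 ∨ p = 1) →
    evalutateLoop ans (pref ++ pos) (some (acc, (pref.length : Int))) =
      some (acc ++ (ans.zip pos).map (fun xp => bElem xp.1 xp.2),
            ((pref.length + ans.length : Nat) : Int)) := by
  induction ans with
  | nil => intro pos pref acc _ _; simp [evalutateLoop]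
  | cons x t ih =>
    intro pos pref acc hlen hpv
    cases pos with
    | nil => simp at hlen
    | cons p rest =>
      have hp : p = 0 ∨ p = 1 := hpv p (by simp)
      have hstep : evalutateLoop (x :: t) (pref ++ p :: rest) (some (acc, (pref.length : Int))) =
          evalutateLoop t ((pref ++ [p]) ++ rest)
            (some (acc ++ [bElem x p], ((pref ++ [p]).length : Int))) := by
        simp only [evalutateLoop, List.foldl_cons, PySem.List.pyGet?_append_length,
          letterToValue_valid x p hp]
        simp
      rw [hstep, ih rest (pref ++ [p]) (acc ++ [bElem x p])
            (by simpa using Nat.le_of_succ_le_succ (by simpa using hlen))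
            (by intro q hq; exact hpv q (by simp at hq ⊢; tauto))]
      simp
      ring

lemma polTable_valid (p : Int) (hp : p = 0 ∨ p = 1) :
    PySem.Dict.get? polTable p = some (decide (p = 1)) := by
  rcases hp with hp | hp <;> subst hp <;> decide

lemma stepB_at (positives : List Int) (i p : Int) (acc : List Int) (x : String)
    (h : PySem.List.pyGet? positives i = some p) (hp : p = 0 ∨ p = 1) :
    stepB positives (some acc) (i, x) = some (acc ++ [bElem x p]) := by
  simp only [stepB, h, polTable_valid p hp, bElem]
  split_ifs <;> rfl

lemma loopB_eq (ans : List String) : ∀ (pos pref acc : List Int),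
    ans.length ≤ pos.length →
    (∀ p ∈ pos.take ans.length, p = 0 ∨ p = 1) →
    (PySem.List.enumerate ans ((pref.length : Int))).foldl (stepB (pref ++ pos)) (some acc) =
      some (acc ++ (ans.zip pos).map (fun xp => bElem xp.1 xp.2)) := by
  induction ans with
  | nil => intro pos pref acc _ _; simp [PySem.List.enumerate_nil]
  | cons x t ih =>
    intro pos pref acc hlen hpv
    cases pos with
    | nil => simp at hlen
    | cons p rest =>
      have hone : (pref.length : Int) + 1 = ((pref ++ [p]).length : Int) := by simp
      have hre : pref ++ p :: rest = (pref ++ [p]) ++ rest := by simp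
      rw [PySem.List.enumerate_cons, List.foldl_cons,
        stepB_at (pref ++ p :: rest) (pref.length : Int) p acc x
          (by rw [PySem.List.pyGet?_append_length]) (hpv p (by simp)),
        hone, hre, ih rest (pref ++ [p]) (acc ++ [bElem x p])
          (by simpa using Nat.le_of_succ_le_succ (by simpa using hlen))
          (by intro q hq; exact hpv q (by simp at hq ⊢; tauto))]
      simp

-- ===== VERDICT (by name: the statement is the Claim_ definition above) =====
theorem evalutate_spec : Claim_equal_evalutate := by
  intro answers positives _hdom hpre
  unfold Spec_evalutate evalutate evalutate_alt
  have hA := loopA_eq answers positives [] [] hpre.1 hpre.2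
  have hB := loopB_eq answers positives [] [] hpre.1 hpre.2
  simp only [List.nil_append, List.length_nil, Nat.cast_zero, Nat.zero_add] at hA hB
  unfold evalutateAltLoop
  rw [hA, hB]
  simp
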